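-- pv_equiv track=rewrite | github.com/kagrin97/Python-algorithm | python/프로그래머스/문자열 내림차순으로 배치하기.py | solution
-- ===== SOURCE A (Python) =====
-- def solution(s):
--     answer = ''
--     A = []
--     a = []
--
--     for i in range(len(s)):
--         if s[i].isupper():
--             A.append(s[i])
--         else:
--             a.append(s[i])
--     a.sort(reverse=True)
--     A.sort(reverse=True)
--     s = a + A
--     answer = "".join(s)
--
--     return answer
-- ===== SOURCE B (Python) =====
-- def solution(s):
--     counts = [0] * 128
--     for ch in s:
--         counts[ord(ch)] += 1
--     out = []
--     for code in range(127, -1, -1):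
--         if not (65 <= code <= 90):
--             out.append(chr(code) * counts[code])
--     for code in range(90, 64, -1):
--         out.append(chr(code) * counts[code])
--     return ''.join(out)
-- ===== Notes on version B (the rewrite author's own statement) =====
-- stated objective: faster
-- what changed: Replaces A's two comparison sorts of the partitioned characters by a single counting pass over the fixed 128-entry ASCII table, emitting codes 127..0 (skipping uppercase) and then 90..65.
import Mathlib
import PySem

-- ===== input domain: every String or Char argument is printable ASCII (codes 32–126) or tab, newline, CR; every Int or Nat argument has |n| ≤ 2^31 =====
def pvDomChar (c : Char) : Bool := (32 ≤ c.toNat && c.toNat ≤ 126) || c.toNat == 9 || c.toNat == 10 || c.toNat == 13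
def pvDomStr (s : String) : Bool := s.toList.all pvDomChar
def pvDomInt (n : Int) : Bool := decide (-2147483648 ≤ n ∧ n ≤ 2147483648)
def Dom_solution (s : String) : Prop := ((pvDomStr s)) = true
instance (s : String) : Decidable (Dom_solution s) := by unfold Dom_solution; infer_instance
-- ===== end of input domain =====

-- B replaces A's two comparison sorts by a single counting pass over the fixed ASCII alphabet
-- (emit codes 127..0 skipping uppercase, then 90..65): an O(n + k) counting sort, asymptotically
-- faster than A's O(n log n); same return value on every domain input.

-- ===== PORT A =====
def solution (s : String) : String :=
  -- A = [] ; a = [] ; for i in range(len(s)): append s[i] to A if s[i].isupper() else to a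
  let cs := s.toList
  let p :=
    (PySem.List.pyRange 0 (PySem.Str.len s) 1).foldl
      (fun (acc : List Char × List Char) i =>
        if PySem.Chars.isupper (PySem.List.pyGetD cs i ' ') then
          (acc.1 ++ [PySem.List.pyGetD cs i ' '], acc.2)
        else
          (acc.1, acc.2 ++ [PySem.List.pyGetD cs i ' ']))
      ([], [])
  -- a.sort(reverse=True) ; A.sort(reverse=True)
  let a := PySem.List.sorted p.2 (fun c => c) true
  let A := PySem.List.sorted p.1 (fun c => c) true
  -- "".join(a + A): joining one-character strings with the empty separator
  String.ofList (PySem.Chars.join [] ((a ++ A).map (fun c => [c])))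

-- ===== PORT B =====
def solution_alt (s : String) : String :=
  let cs := s.toList
  -- counts = [0]*128 ; for ch in s: counts[ord(ch)] += 1
  let counts := cs.foldl
    (fun (v : List Int) ch =>
      PySem.List.pySetD v (ch.toNat : Int) (PySem.List.pyGetD v (ch.toNat : Int) 0 + 1))
    (List.replicate 128 (0 : Int))
  -- chr(code) * counts[code]  (counts[code] ≥ 0, so replicate .toNat is exact)
  let emit : Int → List Char := fun code =>
    List.replicate (PySem.List.pyGetD counts code 0).toNat (Char.ofNat code.toNat)
  -- for code in range(127, -1, -1): if not (65 <= code <= 90): out.append(chr(code)*counts[code])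
  let out1 := (PySem.List.pyRange 127 (-1) (-1)).foldl
    (fun (acc : List (List Char)) code =>
      if ¬ (65 ≤ code ∧ code ≤ 90) then acc ++ [emit code] else acc) []
  -- for code in range(90, 64, -1): out.append(chr(code)*counts[code])
  let out := (PySem.List.pyRange 90 64 (-1)).foldl
    (fun acc code => acc ++ [emit code]) out1
  -- ''.join(out)
  String.ofList (PySem.Chars.join [] out)

-- ===== PRECONDITION & SPEC =====
def Spec_solution (s : String) (out : String) : Prop := out = solution_alt s
instance (s : String) (out : String) : Decidable (Spec_solution s out) := by unfold Spec_solution; infer_instance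

-- ===== CLAIM (what is proved, stated in full; the proofs are below) =====
def Claim_equal_solution : Prop := ∀ (s : String), Dom_solution s → Spec_solution s (solution s)

-- ===== LEMMAS AND PROOFS =====

def pvBlocks (l : List Char) (codes : List Int) : List Char :=
  (codes.map (fun code => List.replicate (l.count (Char.ofNat code.toNat)) (Char.ofNat code.toNat))).flatten

theorem pvChar_le_iff (c d : Char) : (c ≤ d) ↔ c.toNat ≤ d.toNat := by
  rw [Char.le_def]; exact UInt32.le_iff_toNat_le

theorem pvToNat_ofNat (n : Nat) (h : n < 128) : (Char.ofNat n).toNat = n := by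
  rw [Char.ofNat, dif_pos (by constructor <;> omega : Nat.isValidChar n)]
  simp [Char.toNat, Char.ofNatAux]

theorem pvJoin_nil_flatten (parts : List (List Char)) :
    PySem.Chars.join [] parts = parts.flatten := by
  show [].intercalate parts = parts.flatten
  rw [List.intercalate]
  induction parts with
  | nil => rfl
  | cons a t ih => cases t <;> simp_all

theorem pvPartition (l X Y : List Char) :
    l.foldl
      (fun (acc : List Char × List Char) c =>
        if PySem.Chars.isupper c then (acc.1 ++ [c], acc.2) else (acc.1, acc.2 ++ [c]))
      (X, Y)
    = (X ++ l.filter (fun c => PySem.Chars.isupper c),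
       Y ++ l.filter (fun c => !PySem.Chars.isupper c)) := by
  induction l generalizing X Y with
  | nil => simp
  | cons c t ih =>
    by_cases h : PySem.Chars.isupper c <;> simp [h, ih]

theorem pvCount_blocks (l : List Char) (codes : List Int) (c : Char)
    (hb : ∀ x ∈ codes, 0 ≤ x ∧ x < 128) (hnd : codes.Nodup) :
    (pvBlocks l codes).count c = if (c.toNat : Int) ∈ codes then l.count c else 0 := by
  induction codes with
  | nil => simp [pvBlocks]
  | cons x t ih =>
    obtain ⟨hx0, hx128⟩ := hb x (by simp)
    have hxt : (Char.ofNat x.toNat).toNat = x.toNat := pvToNat_ofNat _ (by omega)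
    have ht := ih (fun y hy => hb y (by simp [hy])) hnd.of_cons
    simp only [pvBlocks, List.map_cons, List.flatten_cons, List.count_append] at *
    rw [ht, List.count_replicate]
    by_cases hxc : (Char.ofNat x.toNat) = c
    · have hcx : (c.toNat : Int) = x := by
        rw [← hxc, hxt]; omega
      have hnt : (c.toNat : Int) ∉ t := by rw [hcx]; exact (List.nodup_cons.mp hnd).1
      rw [hcx] at hnt ⊢
      simp [hxc, hnt]
    · have : (c.toNat : Int) ≠ x := by
        intro heq
        apply hxc
        have : x.toNat = c.toNat := by omega
        rw [this] at hxt ⊢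
        exact Char.ext (UInt32.toNat_inj.mp hxt)
      simp [hxc, this, beq_iff_eq]

theorem pvBlocks_perm (l : List Char) (codes : List Int)
    (hb : ∀ x ∈ codes, 0 ≤ x ∧ x < 128) (hnd : codes.Nodup)
    (hcov : ∀ c ∈ l, (c.toNat : Int) ∈ codes) :
    (pvBlocks l codes).Perm l := by
  rw [List.perm_iff_count]
  intro c
  rw [pvCount_blocks l codes c hb hnd]
  by_cases hc : (c.toNat : Int) ∈ codes
  · simp [hc]
  · have : c ∉ l := fun h => hc (hcov c h)
    simp [hc, List.count_eq_zero_of_not_mem this]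

theorem pvBlocks_pairwise (l : List Char) (codes : List Int)
    (hb : ∀ x ∈ codes, 0 ≤ x ∧ x < 128) (hsort : codes.Pairwise (· > ·)) :
    (pvBlocks l codes).Pairwise (· ≥ ·) := by
  induction codes with
  | nil => simp [pvBlocks]
  | cons x t ih =>
    obtain ⟨hx0, hx128⟩ := hb x (by simp)
    rw [pvBlocks, List.map_cons, List.flatten_cons, List.pairwise_append]
    refine ⟨List.pairwise_replicate.mpr (by simp), ih (fun y hy => hb y (by simp [hy])) hsort.of_cons, ?_⟩
    intro a ha b hb'
    have hax : a = Char.ofNat x.toNat := (List.eq_of_mem_replicate ha)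
    obtain ⟨blk, hblk, hbmem⟩ := List.mem_flatten.mp hb'
    obtain ⟨y, hy, rfl⟩ := List.mem_map.mp hblk
    obtain ⟨hy0, hy128⟩ := hb y (by simp [hy])
    have hyx : y < x := (List.pairwise_cons.mp hsort).1 y hy
    have hbv : b = Char.ofNat y.toNat := List.eq_of_mem_replicate hbmem
    rw [hax, hbv, ge_iff_le, pvChar_le_iff, pvToNat_ofNat _ (by omega), pvToNat_ofNat _ (by omega)]
    omega

theorem pvSorted_rev_eq_blocks (l : List Char) (codes : List Int)
    (hb : ∀ x ∈ codes, 0 ≤ x ∧ x < 128) (hsort : codes.Pairwise (· > ·))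
    (hcov : ∀ c ∈ l, (c.toNat : Int) ∈ codes) :
    PySem.List.sorted l (fun c => c) true = pvBlocks l codes := by
  have hnd : codes.Nodup := hsort.imp (fun h => ne_of_gt h)
  have h1 : (PySem.List.sorted l (fun c => c) true).Pairwise (fun a b : Char => a ≥ b) :=
    (PySem.List.sorted_pairwise_rev l (fun c => c)).imp (fun h => h)
  have h2 := pvBlocks_pairwise l codes hb hsort
  have hperm : (PySem.List.sorted l (fun c => c) true).Perm (pvBlocks l codes) :=
    (PySem.List.sorted_perm l (fun c => c) true).trans (pvBlocks_perm l codes hb hnd hcov).symm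
  exact List.eq_of_perm_of_sorted (fun a b _ _ hab hba => le_antisymm hba hab) h1 h2 hperm

theorem pvCounts_getD (l : List Char) (v : List Int) (hv : v.length = 128)
    (hl : ∀ c ∈ l, c.toNat < 128) (n : Nat) (hn : n < 128) :
    (l.foldl
      (fun (v : List Int) ch =>
        PySem.List.pySetD v (ch.toNat : Int) (PySem.List.pyGetD v (ch.toNat : Int) 0 + 1))
      v).getD n 0
    = v.getD n 0 + l.count (Char.ofNat n) := by
  induction l generalizing v with
  | nil => simp
  | cons c t ih =>
    have hc : c.toNat < 128 := hl c (by simp)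
    rw [List.foldl_cons, PySem.List.pySetD_natCast, PySem.List.pyGetD_natCast,
      ih _ (by simp [hv]) (fun d hd => hl d (by simp [hd]))]
    rw [List.count_cons]
    by_cases h : n = c.toNat
    · have hchr : Char.ofNat n = c := by rw [h, Char.ofNat_toNat]
      simp [List.getD, List.getElem?_set, ← h, hv, hn, hchr]
      omega
    · have hne : Char.ofNat n ≠ c := fun he => h (by rw [← he, pvToNat_ofNat n hn])
      have h1 : c.toNat ≠ n := Ne.symm h
      have h2 : c ≠ Char.ofNat n := Ne.symm hne
      simp [List.getD, List.getElem?_set, h1, h2]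

theorem pvBlocks_filter (l : List Char) (codes : List Int) (p : Char → Bool)
    (hp : ∀ x ∈ codes, p (Char.ofNat x.toNat) = true) :
    pvBlocks (l.filter p) codes = pvBlocks l codes := by
  unfold pvBlocks
  congr 1
  apply List.map_congr_left
  intro x hx
  rw [List.count_filter (by simp [hp x hx])]

theorem pvIsupper_iff (c : Char) : PySem.Chars.isupper c = true ↔ 65 ≤ c.toNat ∧ c.toNat ≤ 90 := by
  show (decide ('A' ≤ c) && decide (c ≤ 'Z')) = true ↔ _
  simp [pvChar_le_iff]

theorem pvPairwise_gt_pyRange_neg_one (a b : Int) :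
    (PySem.List.pyRange a b (-1)).Pairwise (· > ·) := by
  rw [PySem.List.pyRange_neg_one_eq_reverse, List.pairwise_reverse]
  exact PySem.List.pairwise_lt_pyRange_one _ _

theorem pvFoldl_append_ifnot {β : Type} (p : Int → Prop) [DecidablePred p] (f : Int → β)
    (l : List Int) (acc : List β) :
    l.foldl (fun a x => if ¬ p x then a ++ [f x] else a) acc
      = acc ++ (l.filter (fun x => decide (¬ p x))).map f := by
  induction l generalizing acc with
  | nil => simp
  | cons x t ih =>
    rw [List.foldl_cons, List.filter_cons]
    by_cases h : p x
    · rw [if_neg (by simpa using h), if_neg (by simpa using h), ih]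
    · rw [if_pos (by simpa using h), if_pos (by simpa using h), ih]
      simp

-- ===== VERDICT (by name: the statement is the Claim_ definition above) =====
theorem solution_spec : Claim_equal_solution := by
  intro s hdom
  unfold Spec_solution
  have hdom' : pvDomStr s = true := hdom

  have hlt : ∀ c ∈ s.toList, c.toNat < 128 := by
    intro c hc
    have := (List.all_eq_true.mp hdom') c hc
    simp [pvDomChar] at this
    omega
  simp only [solution, solution_alt]
  -- A side: index loop = fold over the characters, then partition
  rw [PySem.Str.len_eq,
    PySem.List.foldl_pyRange_zero_pyGetD' s.toList ' '
      (fun (acc : List Char × List Char) c =>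
        if PySem.Chars.isupper c then (acc.1 ++ [c], acc.2) else (acc.1, acc.2 ++ [c]))
      ([], []),
    pvPartition, PySem.Chars.join_nil_singletons]
  simp only [List.nil_append]
  -- B side: name the counts vector and compute its entries
  set cnts := List.foldl
      (fun (v : List Int) ch => PySem.List.pySetD v (↑ch.toNat) (PySem.List.pyGetD v (↑ch.toNat) 0 + 1))
      (List.replicate 128 (0:Int)) s.toList with hcnts
  have hclen : cnts.length = 128 := by
    rw [hcnts]
    generalize hv : List.replicate 128 (0:Int) = v
    have : v.length = 128 := by rw [← hv]; simp
    clear hv hcnts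
    induction s.toList generalizing v with
    | nil => simpa
    | cons c t ih => 
      rw [List.foldl_cons]
      exact ih _ (by simp [PySem.List.length_pySetD, this])
  have hemit : ∀ code : Int, 0 ≤ code → code < 128 →
      (PySem.List.pyGetD cnts code 0).toNat = s.toList.count (Char.ofNat code.toNat) := by
    intro code h0 h1
    rw [PySem.List.pyGetD_eq_getElem cnts 0 h0 (by rw [hclen]; exact_mod_cast h1),
      ← List.getD_eq_getElem cnts 0 (show code.toNat < cnts.length by rw [hclen]; omega), hcnts,
      pvCounts_getD s.toList _ (by simp) hlt code.toNat (by omega),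
      List.getD_eq_getElem _ _ (show code.toNat < (List.replicate 128 (0:Int)).length by simp; omega),
      List.getElem_replicate]
    simp
  rw [pvFoldl_append_ifnot (fun code => (65:Int) ≤ code ∧ code ≤ 90)
        (fun code => List.replicate (PySem.List.pyGetD cnts code 0).toNat (Char.ofNat code.toNat))
        (PySem.List.pyRange 127 (-1) (-1)) [],
      PySem.List.foldl_append_singleton_eq_map, pvJoin_nil_flatten, List.nil_append,
      List.flatten_append]
  -- the uppercase block
  have hup : PySem.List.sorted (s.toList.filter (fun c => PySem.Chars.isupper c)) (fun c => c) true
      = ((PySem.List.pyRange 90 64 (-1)).map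
          (fun code => List.replicate (PySem.List.pyGetD cnts code 0).toNat (Char.ofNat code.toNat))).flatten := by
    have hb : ∀ x ∈ PySem.List.pyRange 90 64 (-1), (0:Int) ≤ x ∧ x < 128 := by
      intro x hx; rw [PySem.List.mem_pyRange_neg_one] at hx; omega
    rw [pvSorted_rev_eq_blocks _ _ hb (pvPairwise_gt_pyRange_neg_one _ _)
        (by
          intro c hc
          rw [List.mem_filter] at hc
          have := (pvIsupper_iff c).mp hc.2
          rw [PySem.List.mem_pyRange_neg_one]; omega),
      pvBlocks_filter _ _ _
        (by
          intro x hx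
          have hbx := hb x hx
          rw [PySem.List.mem_pyRange_neg_one] at hx
          rw [pvIsupper_iff, pvToNat_ofNat _ (by omega)]
          omega)]
    unfold pvBlocks
    congr 1
    apply List.map_congr_left
    intro x hx
    have hbx := hb x hx
    rw [hemit x hbx.1 hbx.2]
  -- the non-uppercase block
  have hlo : PySem.List.sorted (s.toList.filter (fun c => !PySem.Chars.isupper c)) (fun c => c) true
      = (((PySem.List.pyRange 127 (-1) (-1)).filter
            (fun x => decide (¬ ((65:Int) ≤ x ∧ x ≤ 90)))).map
          (fun code => List.replicate (PySem.List.pyGetD cnts code 0).toNat (Char.ofNat code.toNat))).flatten := by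
    have hb : ∀ x ∈ (PySem.List.pyRange 127 (-1) (-1)).filter
        (fun x => decide (¬ ((65:Int) ≤ x ∧ x ≤ 90))), (0:Int) ≤ x ∧ x < 128 := by
      intro x hx
      rw [List.mem_filter, PySem.List.mem_pyRange_neg_one] at hx
      omega
    rw [pvSorted_rev_eq_blocks _ _ hb
        ((pvPairwise_gt_pyRange_neg_one 127 (-1)).filter _)
        (by
          intro c hc
          rw [List.mem_filter] at hc
          have hnu : ¬ (65 ≤ c.toNat ∧ c.toNat ≤ 90) := by
            intro h
            have := (pvIsupper_iff c).mpr h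
            simp [this] at hc
          have hcl := hlt c hc.1
          rw [List.mem_filter, PySem.List.mem_pyRange_neg_one]
          constructor
          · omega
          · simp; omega),
      pvBlocks_filter _ _ _
        (by
          intro x hx
          have hbx := hb x hx
          rw [List.mem_filter] at hx
          have hx2 := hx.2
          simp at hx2
          have : ¬ (PySem.Chars.isupper (Char.ofNat x.toNat) = true) := by
            rw [pvIsupper_iff, pvToNat_ofNat _ (show x.toNat < 128 by omega)]
            omega
          simp [this])]
    unfold pvBlocks
    congr 1
    apply List.map_congr_left
    intro x hx
    have hbx := hb x hx
    rw [hemit x hbx.1 hbx.2]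
  rw [hup, hlo]
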